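-- pv_equiv track=rewrite | github.com/ZrpChuang/steering | src/pre_exp_llava/gen_llava-v1.5-7b_20260104_004851/inspect_delta_tokens_Sfix.py | choose_merge_col_idx
-- ===== SOURCE A (Python) =====
-- from typing import Dict, Any, List, Optional, Tuple
--
-- def choose_merge_col_idx(cols: List[str]) -> int:
--     """
--     当某行字段数 > ncol 时，把多出来的字段合并回哪个列？
--     优先选择最可能包含自由文本的列（且尽量靠右），否则选最后一列。
--     """
--     text_keys = [
--         "token_str", "token_piece", "tok_str", "piece",
--         "reason", "text", "question", "answer", "prompt", "content"
--     ]
--     candidate_idxs = []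
--     for i, c in enumerate(cols):
--         cl = c.lower()
--         if any(k in cl for k in text_keys):
--             candidate_idxs.append(i)
--     if candidate_idxs:
--         return max(candidate_idxs)  # 靠右的文本列更可能“吞”掉多余逗号
--     return len(cols) - 1
-- ===== SOURCE B (Python) =====
-- from typing import List
--
-- def choose_merge_col_idx(cols: List[str]) -> int:
--     """Rightmost text-like column via a single reverse scan with early return."""
--     text_keys = [
--         "token_str", "token_piece", "tok_str", "piece",
--         "reason", "text", "question", "answer", "prompt", "content"
--     ]
--     for i, c in reversed(list(enumerate(cols))):
--         cl = c.lower()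
--         if any(k in cl for k in text_keys):
--             return i
--     return len(cols) - 1
-- ===== Notes on version B (the rewrite author's own statement) =====
-- stated objective: simpler
-- what changed: Replaced accumulate-all-candidates-then-max with a single right-to-left scan that returns the first (i.e. rightmost) text-like column immediately, eliminating the candidate list and the final max call.
import Mathlib
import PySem

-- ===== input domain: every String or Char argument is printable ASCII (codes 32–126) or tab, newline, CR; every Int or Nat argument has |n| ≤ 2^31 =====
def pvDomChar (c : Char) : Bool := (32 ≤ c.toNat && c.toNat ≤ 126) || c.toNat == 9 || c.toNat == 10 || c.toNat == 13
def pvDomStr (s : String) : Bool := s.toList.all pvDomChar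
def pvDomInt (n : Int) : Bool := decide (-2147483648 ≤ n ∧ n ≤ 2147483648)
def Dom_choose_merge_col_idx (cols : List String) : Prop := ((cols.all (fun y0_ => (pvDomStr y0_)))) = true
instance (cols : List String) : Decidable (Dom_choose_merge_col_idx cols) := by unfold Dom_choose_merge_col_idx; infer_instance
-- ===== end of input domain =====

-- B replaces A's accumulate-all-candidates-then-max with a single right-to-left scan
-- returning the first (rightmost) text-like column; objective: simpler.

-- ===== PORT A =====
def pvTextKeys : List String :=
  ["token_str", "token_piece", "tok_str", "piece",
   "reason", "text", "question", "answer", "prompt", "content"]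

-- 'any(k in cl for k in text_keys)' on the lowercased column
def pvHit (c : String) : Bool :=
  pvTextKeys.any (fun k => PySem.Str.isIn k (PySem.Str.lower c))

def choose_merge_col_idx (cols : List String) : Int :=
  let candidate_idxs : List Int :=
    (PySem.List.enumerate cols 0).foldl
      (fun acc ic => if pvHit ic.2 then acc ++ [ic.1] else acc) []
  match PySem.List.max? candidate_idxs (fun y => y) with
  | some m => m          -- 'if candidate_idxs: return max(candidate_idxs)'
  | none => (cols.length : Int) - 1

-- ===== PORT B =====
def pvFindRight : List (Int × String) → Option Int
  | [] => none
  | (i, c) :: rest => if pvHit c then some i else pvFindRight rest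

def choose_merge_col_idx_alt (cols : List String) : Int :=
  match pvFindRight ((PySem.List.enumerate cols 0).reverse) with
  | some i => i
  | none => (cols.length : Int) - 1

-- ===== PRECONDITION & SPEC =====
def Spec_choose_merge_col_idx (cols : List String) (out : Int) : Prop := out = choose_merge_col_idx_alt cols
instance (cols : List String) (out : Int) : Decidable (Spec_choose_merge_col_idx cols out) := by unfold Spec_choose_merge_col_idx; infer_instance

-- ===== CLAIM (what is proved, stated in full; the proofs are below) =====
def Claim_equal_choose_merge_col_idx : Prop := ∀ (cols : List String), Dom_choose_merge_col_idx cols → Spec_choose_merge_col_idx cols (choose_merge_col_idx cols)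

-- ===== LEMMAS AND PROOFS =====

-- B's reverse scan returns the last hit of the original list
lemma pvFindRight_eq_head? (l : List (Int × String)) :
    pvFindRight l = ((l.filter (fun p => pvHit p.2)).map Prod.fst).head? := by
  induction l with
  | nil => rfl
  | cons p t ih =>
    obtain ⟨i, c⟩ := p
    by_cases h : pvHit c
    · simp [pvFindRight, h]
    · simp [pvFindRight, h, ih]

-- running max over a strictly increasing list is its last element
lemma pvFoldlMax_sorted (t : List Int) (x : Int)
    (hs : t.Pairwise (· < ·)) (hx : ∀ y ∈ t, x < y) :
    t.foldl max x = t.getLastD x := by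
  induction t generalizing x with
  | nil => rfl
  | cons y t' ih =>
    have hxy : x < y := hx y (by simp)
    have : max x y = y := max_eq_right hxy.le
    simp only [List.foldl_cons, this, List.getLastD_cons]
    exact ih y (hs.sublist (List.sublist_cons_self _ _))
      (fun z hz => List.rel_of_pairwise_cons hs hz)

lemma pvMax?_sorted (c : List Int) (hs : c.Pairwise (· < ·)) :
    PySem.List.max? c (fun y => y) = c.getLast? := by
  cases c with
  | nil => rfl
  | cons x t =>
    rw [PySem.List.max?_id_cons,
        pvFoldlMax_sorted t x (hs.sublist (List.sublist_cons_self _ _))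
          (fun z hz => List.rel_of_pairwise_cons hs hz)]
    simp [List.getLast?_cons, List.getLastD_eq_getLast?]

lemma pvEnumerate_pairwise (cols : List String) :
    (PySem.List.enumerate cols 0).Pairwise (fun p q => p.1 < q.1) := by
  rw [← List.pairwise_map (f := Prod.fst), PySem.List.map_fst_enumerate]
  exact PySem.List.pairwise_lt_pyRange_one 0 (0 + (cols.length : Int))

-- ===== VERDICT (by name: the statement is the Claim_ definition above) =====
theorem choose_merge_col_idx_spec : Claim_equal_choose_merge_col_idx := by
  intro cols _
  unfold Spec_choose_merge_col_idx choose_merge_col_idx choose_merge_col_idx_alt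
  rw [PySem.List.foldl_append_if (fun ic => pvHit ic.2) Prod.fst _ []]
  have hc : ((PySem.List.enumerate cols 0).filter (fun p => pvHit p.2)).map
      Prod.fst |>.Pairwise (· < ·) := by
    rw [List.pairwise_map]
    exact (pvEnumerate_pairwise cols).sublist List.filter_sublist
  rw [pvFindRight_eq_head?, List.filter_reverse, List.map_reverse,
      List.head?_reverse]
  simp only [List.nil_append, pvMax?_sorted _ hc]
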